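-- pv_equiv track=rewrite | github.com/xuxu298/PQCAnalyzer | src/flow_analyzer/handshake_parser/ssh_parser.py | _pick_first_known_kex
-- ===== SOURCE A (Python) =====
-- SSH_HYBRID_PQC_KEX = {
--     "sntrup761x25519-sha512@openssh.com",
--     "mlkem768x25519-sha256",
--     "mlkem768nistp256-sha256",
--     "mlkem1024nistp384-sha384",
-- }
--
-- def _pick_first_known_kex(kex_list: list[str]) -> str | None:
--     """Pick first hybrid PQC if present; else first non-ext-info algo."""
--     for k in kex_list:
--         if k in SSH_HYBRID_PQC_KEX:
--             return k
--     for k in kex_list: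
--         if not k.startswith("ext-info-"):
--             return k
--     return kex_list[0] if kex_list else None
-- ===== SOURCE B (Python) =====
-- SSH_HYBRID_PQC_KEX = {
--     "sntrup761x25519-sha512@openssh.com",
--     "mlkem768x25519-sha256",
--     "mlkem768nistp256-sha256",
--     "mlkem1024nistp384-sha384",
-- }
--
-- def _pick_first_known_kex(kex_list: list[str]) -> str | None:
--     """Single pass: return a hybrid PQC immediately; remember first non-ext-info fallback."""
--     candidate = None
--     for k in kex_list:
--         if k in SSH_HYBRID_PQC_KEX:
--             return k
--         if candidate is None and not k.startswith("ext-info-"):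
--             candidate = k
--     if candidate is not None:
--         return candidate
--     return kex_list[0] if kex_list else None
-- ===== Notes on version B (the rewrite author's own statement) =====
-- stated objective: alternative
-- what changed: Replaces A's two sequential scans over kex_list by a single pass that returns a hybrid immediately and carries the first non-ext-info element as a fallback accumulator.
import Mathlib
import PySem

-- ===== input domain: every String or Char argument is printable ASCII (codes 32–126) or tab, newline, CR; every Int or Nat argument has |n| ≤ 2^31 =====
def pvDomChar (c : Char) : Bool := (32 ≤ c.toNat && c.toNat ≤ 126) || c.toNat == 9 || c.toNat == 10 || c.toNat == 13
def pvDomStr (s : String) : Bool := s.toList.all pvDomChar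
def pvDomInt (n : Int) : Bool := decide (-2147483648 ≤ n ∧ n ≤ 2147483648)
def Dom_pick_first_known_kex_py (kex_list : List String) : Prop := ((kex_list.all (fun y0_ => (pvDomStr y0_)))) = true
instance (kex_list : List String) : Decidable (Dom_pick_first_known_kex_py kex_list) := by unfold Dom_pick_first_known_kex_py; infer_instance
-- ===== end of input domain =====

-- B replaces A's two sequential scans by a single pass with a fallback accumulator (objective: alternative decomposition).

-- ===== PORT A =====
def pvHybrid : List String :=
  ["sntrup761x25519-sha512@openssh.com", "mlkem768x25519-sha256",
   "mlkem768nistp256-sha256", "mlkem1024nistp384-sha384"]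

-- first loop of A: first element in the hybrid set
def pvA_loop1 : List String → Option String
  | [] => none
  | k :: rest => if pvHybrid.contains k then some k else pvA_loop1 rest

-- second loop of A: first element not starting with "ext-info-"
def pvA_loop2 : List String → Option String
  | [] => none
  | k :: rest => if PySem.Str.startswith k "ext-info-" then pvA_loop2 rest else some k

def pick_first_known_kex_py (kex_list : List String) : Option String :=
  match pvA_loop1 kex_list with
  | some k => some k
  | none =>
    match pvA_loop2 kex_list with
    | some k => some k
    | none => kex_list.head?   -- kex_list[0] if kex_list else None

-- ===== PORT B =====
-- single pass with fallback candidate; returns the early/loop result (none = loop finished with no candidate)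
def pvB_loop : List String → Option String → Option String
  | [], cand => cand
  | k :: rest, cand =>
    if pvHybrid.contains k then some k
    else pvB_loop rest
      (if cand.isNone && !(PySem.Str.startswith k "ext-info-") then some k else cand)

def pick_first_known_kex_py_alt (kex_list : List String) : Option String :=
  match pvB_loop kex_list none with
  | some c => some c
  | none => kex_list.head?   -- kex_list[0] if kex_list else None

-- ===== PRECONDITION & SPEC =====
def Spec_pick_first_known_kex_py (kex_list : List String) (out : Option String) : Prop := out = pick_first_known_kex_py_alt kex_list
instance (kex_list : List String) (out : Option String) : Decidable (Spec_pick_first_known_kex_py kex_list out) := by unfold Spec_pick_first_known_kex_py; infer_instance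

-- ===== CLAIM (what is proved, stated in full; the proofs are below) =====
def Claim_equal_pick_first_known_kex_py : Prop := ∀ (kex_list : List String), Dom_pick_first_known_kex_py kex_list → Spec_pick_first_known_kex_py kex_list (pick_first_known_kex_py kex_list)

-- ===== LEMMAS AND PROOFS =====
theorem pvB_loop_eq (l : List String) (cand : Option String) :
    pvB_loop l cand =
      match pvA_loop1 l with
      | some k => some k
      | none => match cand with
        | some c => some c
        | none => pvA_loop2 l := by
  induction l generalizing cand with
  | nil => cases cand <;> rfl
  | cons k rest ih =>
    simp only [pvB_loop, pvA_loop1, pvA_loop2]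
    rw [ih]
    by_cases hh : pvHybrid.contains k = true
    · rw [if_pos hh, if_pos hh]
    · rw [if_neg hh, if_neg hh]
      cases h1 : pvA_loop1 rest with
      | some j => rfl
      | none =>
        cases cand with
        | some c => rfl
        | none =>
          by_cases hs : PySem.Str.startswith k "ext-info-" = true
          · simp only [hs, Option.isNone_none, Bool.not_true, Bool.and_false,
              Bool.false_eq_true, if_false, if_true]
          · simp only [Bool.not_eq_true] at hs
            simp only [hs, Option.isNone_none, Bool.not_false, Bool.and_true,
              if_true, Bool.false_eq_true, if_false]

-- ===== VERDICT (by name: the statement is the Claim_ definition above) =====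
theorem pick_first_known_kex_py_spec : Claim_equal_pick_first_known_kex_py := by
  intro l _
  unfold Spec_pick_first_known_kex_py pick_first_known_kex_py pick_first_known_kex_py_alt
  rw [pvB_loop_eq]
  cases h1 : pvA_loop1 l <;> cases h2 : pvA_loop2 l <;> simp
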